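-- pv_equiv track=rewrite | github.com/posl/comment_recommendation | script/mod_gen/5_time/en/117_D/4.py | xor_sum
-- ===== SOURCE A (Python) =====
-- def xor_sum(n, k, a):
--     max_f = 0
--     for i in range(k+1):
--         f = 0
--         for j in range(n):
--             f += i ^ a[j]
--         if f > max_f:
--             max_f = f
--     return max_f
-- ===== SOURCE B (Python) =====
-- def xor_sum(n, k, a):
--     # per-bit tallies: each candidate i costs O(bit_length(k)) instead of O(n)
--     vals = a[:max(n, 0)]
--     total = sum(vals)
--     bits = max(k, 0).bit_length()
--     delta = [(len(vals) - 2 * sum((x >> b) & 1 for x in vals)) << b for b in range(bits)]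
--     best = 0
--     for i in range(k + 1):
--         f = total
--         ii = i
--         b = 0
--         while ii:
--             if ii & 1:
--                 f += delta[b]
--             ii >>= 1
--             b += 1
--         if f > best:
--             best = f
--     return best
-- ===== Notes on version B (the rewrite author's own statement) =====
-- stated objective: faster
-- what changed: Replaces the O(n) inner scan per candidate i by 33-at-most precomputed per-bit tallies (count of elements with bit b set), so f(i) is assembled from the set bits of i alone; Pre_ excludes only the inputs where A raises IndexError (k >= 0 and 0 < n > len(a)).
import Mathlib
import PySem

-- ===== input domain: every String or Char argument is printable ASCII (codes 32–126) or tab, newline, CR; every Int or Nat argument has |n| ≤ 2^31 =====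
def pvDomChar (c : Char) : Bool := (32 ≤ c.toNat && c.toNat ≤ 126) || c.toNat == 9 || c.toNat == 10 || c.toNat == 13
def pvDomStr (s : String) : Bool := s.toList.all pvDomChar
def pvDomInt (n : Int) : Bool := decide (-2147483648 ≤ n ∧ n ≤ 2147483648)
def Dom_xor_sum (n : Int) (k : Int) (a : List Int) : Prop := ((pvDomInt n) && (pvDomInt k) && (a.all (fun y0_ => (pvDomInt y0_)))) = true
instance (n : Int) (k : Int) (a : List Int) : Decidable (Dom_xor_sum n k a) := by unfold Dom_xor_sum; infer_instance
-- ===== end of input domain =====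

-- B replaces A's O(n) inner scan per candidate i by precomputed per-bit tallies of a,
-- reading f(i) off the set bits of i; proved to return A's exact value.


-- ===== PORT A =====
def xor_sum (n : Int) (k : Int) (a : List Int) : Int :=
  (PySem.List.pyRange 0 (k+1) 1).foldl (fun max_f i =>
    let f := (PySem.List.pyRange 0 n 1).foldl
      (fun f j => f + PySem.Int.bxor i (PySem.List.pyGetD a j 0)) 0
    if f > max_f then f else max_f) 0

-- ===== PORT B =====
-- the 'while ii:' loop of Source B; the '≤' in the exit test is a totality guard only
-- (B always calls it with ii ≥ 0, where it is exactly Python's 'while ii:')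
def pvBitLoop (delta : List Int) (ii : Int) (b : Int) (f : Int) : Int :=
  if _h : ii ≤ 0 then f
  else pvBitLoop delta (ii >>> (1:Nat)) (b + 1)
    (if PySem.Int.band ii 1 == 1 then f + PySem.List.pyGetD delta b 0 else f)
termination_by ii.toNat
decreasing_by
  rw [Int.shiftRight_eq_div_pow]
  norm_num
  omega

def xor_sum_alt (n : Int) (k : Int) (a : List Int) : Int :=
  let vals := PySem.List.slice a none (some (max n 0))
  let total := vals.sum
  let bits := PySem.Int.bitLength (max k 0)
  let delta := (List.range bits).map (fun (b : Nat) =>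
    ((vals.length : Int) - 2 * (vals.map (fun (x : Int) => PySem.Int.band (x >>> b) 1)).sum) <<< b)
  (PySem.List.pyRange 0 (k+1) 1).foldl (fun best i =>
    let f := pvBitLoop delta i 0 total
    if f > best then f else best) 0

-- ===== PRECONDITION & SPEC =====
-- Pre_ excludes exactly the inputs where Python A raises IndexError: k ≥ 0 together with n > len(a).
def Pre_xor_sum (n : Int) (k : Int) (a : List Int) : Prop := n ≤ (a.length : Int) ∨ k < 0
instance (n : Int) (k : Int) (a : List Int) : Decidable (Pre_xor_sum n k a) := by
  unfold Pre_xor_sum; infer_instance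
def pvWitness_xor_sum : Int × Int × List Int := (3, 5, [1, -2, 3])
def Spec_xor_sum (n : Int) (k : Int) (a : List Int) (out : Int) : Prop := out = xor_sum_alt n k a
instance (n : Int) (k : Int) (a : List Int) (out : Int) : Decidable (Spec_xor_sum n k a out) := by unfold Spec_xor_sum; infer_instance

-- ===== CLAIM (what is proved, stated in full; the proofs are below) =====
def Claim_equal_xor_sum : Prop := ∀ (n : Int) (k : Int) (a : List Int), Dom_xor_sum n k a → Pre_xor_sum n k a → Spec_xor_sum n k a (xor_sum n k a)

-- ===== LEMMAS AND PROOFS =====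

-- parity of a XOR
lemma pv_xor_mod_two (m v : Nat) : (m ^^^ v) % 2 = (m + v) % 2 := by
  have hbit : (m ^^^ v).testBit 0 = (m.testBit 0 ^^ v.testBit 0) := Nat.testBit_xor m v 0
  simp only [Nat.testBit_zero] at hbit
  rcases Nat.mod_two_eq_zero_or_one (m ^^^ v) with ht | ht <;>
    rcases Nat.mod_two_eq_zero_or_one m with hm2 | hm2 <;>
      rcases Nat.mod_two_eq_zero_or_one v with hv2 | hv2 <;>
        rw [ht, hm2, hv2] at hbit <;> simp at hbit <;> omega

-- m ^^^ v rewritten bit-by-bit relative to v, for m < 2^M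
lemma pv_nat_xor_expand (M : Nat) : ∀ (m v : Nat), m < 2 ^ M →
    ((m ^^^ v : Nat) : Int) = (v : Int) + ((List.range M).map (fun b =>
      if m.testBit b then (if v.testBit b then -(2 ^ b : Int) else (2 ^ b : Int)) else 0)).sum := by
  induction M with
  | zero =>
    intro m v h
    have hm : m = 0 := by omega
    subst hm
    simp
  | succ M IH =>
    intro m v h
    have h2 : m / 2 < 2 ^ M := by
      have : 2 ^ (M + 1) = 2 * 2 ^ M := by ring
      omega
    have IH2 := IH (m / 2) (v / 2) h2
    rw [List.range_succ_eq_map, List.map_cons, List.sum_cons, List.map_map]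
    have hmap : (List.range M).map ((fun b =>
          if m.testBit b then (if v.testBit b then -(2 ^ b : Int) else (2 ^ b : Int)) else 0) ∘ Nat.succ)
        = (List.range M).map (fun b => 2 * (if (m / 2).testBit b then (if (v / 2).testBit b then -(2 ^ b : Int) else (2 ^ b : Int)) else 0)) := by
      apply List.map_congr_left
      intro b _
      simp only [Function.comp_apply, Nat.testBit_succ, pow_succ]
      split_ifs <;> ring
    rw [hmap, List.sum_map_mul_left]
    have hS : ((List.range M).map (fun b => if (m / 2).testBit b then (if (v / 2).testBit b then -(2 ^ b : Int) else (2 ^ b : Int)) else 0)).sum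
        = ((m / 2 ^^^ v / 2 : Nat) : Int) - ((v / 2 : Nat) : Int) := by linarith [IH2]
    rw [hS]
    have hT := Nat.div_add_mod (m ^^^ v) 2
    rw [Nat.xor_div_two] at hT
    have hmod : (m ^^^ v) % 2 = (m + v) % 2 := pv_xor_mod_two m v
    have hTi : ((m ^^^ v : Nat) : Int) = 2 * ((m / 2 ^^^ v / 2 : Nat) : Int) + (((m ^^^ v) % 2 : Nat) : Int) := by
      exact_mod_cast hT.symm
    have hVi : (v : Int) = 2 * ((v / 2 : Nat) : Int) + ((v % 2 : Nat) : Int) := by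
      exact_mod_cast (Nat.div_add_mod v 2).symm
    simp only [Nat.testBit_zero, pow_zero]
    rcases Nat.mod_two_eq_zero_or_one m with hm2 | hm2 <;>
      rcases Nat.mod_two_eq_zero_or_one v with hv2 | hv2
    all_goals (
      have hmv2 : (m + v) % 2 = (m % 2 + v % 2) % 2 := Nat.add_mod m v 2
      rw [hm2, hv2] at hmv2
      norm_num at hmv2
      rw [hmv2] at hmod
      rw [hmod] at hTi
      rw [hv2] at hVi
      push_cast at hTi hVi
      simp [hm2, hv2]
      linarith [hTi, hVi])

-- Python's (x >> b) & 1 == 1 is the b-th two's-complement bit of x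
lemma pv_int_bit (x : Int) (b : Nat) (hx : 0 ≤ x) :
    (PySem.Int.band (x >>> b) 1 == 1) = x.toNat.testBit b := by
  obtain ⟨u, rfl⟩ : ∃ u : Nat, x = (u : Nat) := ⟨x.toNat, (Int.toNat_of_nonneg hx).symm⟩
  rw [← Int.natCast_shiftRight]
  rw [show (1 : Int) = ((1 : Nat) : Int) from rfl, PySem.Int.band_natCast]
  rw [Nat.and_one_is_mod, Nat.shiftRight_eq_div_pow]
  simp only [Int.toNat_natCast, Nat.testBit_eq_decide_div_mod_eq]
  rcases Nat.mod_two_eq_zero_or_one (u / 2 ^ b) with h | h <;> simp [h]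

-- Python's a & 1 for a = -w-1
lemma pv_band_neg_one (w : Nat) : PySem.Int.band (-(w:Int) - 1) 1 = ((1 - w % 2 : Nat) : Int) := by
  have hneg : ¬ (0:Int) ≤ -(w:Int) - 1 := by omega
  simp only [PySem.Int.band, if_neg hneg]
  norm_num

-- Python's arithmetic right shift of a negative number
lemma pv_shr_neg (u b : Nat) : (-(u : Int) - 1) >>> b = -((u / 2 ^ b : Nat) : Int) - 1 := by
  rw [Int.shiftRight_eq_div_pow]
  have hp : (0 : Int) < ((2 ^ b : Nat) : Int) := by exact_mod_cast Nat.two_pow_pos b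
  rw [← PySem.Int.floordiv_eq_ediv_of_pos hp]
  rw [PySem.Int.floordiv_eq_iff_of_pos hp]
  have h1 : ((2:Int) ^ b) * ((u / 2 ^ b : Nat) : Int) + ((u % 2 ^ b : Nat) : Int) = (u : Int) := by
    exact_mod_cast Nat.div_add_mod u (2 ^ b)
  have h2 : ((u % 2 ^ b : Nat) : Int) < (2:Int) ^ b := by
    exact_mod_cast Nat.mod_lt u (Nat.two_pow_pos b)
  have h3 : (0:Int) ≤ ((u % 2 ^ b : Nat) : Int) := by positivity
  constructor
  · push_cast at h1 h2 h3 ⊢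
    nlinarith [h1, h2, h3]
  · push_cast at h1 h2 h3 ⊢
    nlinarith [h1, h2, h3]

lemma pv_int_bit_neg (x : Int) (b : Nat) (hx : x < 0) :
    (PySem.Int.band (x >>> b) 1 == 1) = !((-x - 1).toNat.testBit b) := by
  obtain ⟨u, rfl⟩ : ∃ u : Nat, x = -(u : Int) - 1 := ⟨(-x - 1).toNat, by omega⟩
  rw [pv_shr_neg, pv_band_neg_one]
  have hu : (-(-(u : Int) - 1) - 1).toNat = u := by omega
  rw [hu]
  simp only [Nat.testBit_eq_decide_div_mod_eq]
  rcases Nat.mod_two_eq_zero_or_one (u / 2 ^ b) with h | h <;> simp [h]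

-- bxor of a nonnegative m with any integer x, expanded over the bits of m
lemma pv_bxor_expand (M m : Nat) (x : Int) (h : m < 2 ^ M) :
    PySem.Int.bxor (m : Int) x = x + ((List.range M).map (fun b =>
      if m.testBit b then (if PySem.Int.band (x >>> b) 1 == 1 then -(2 ^ b : Int) else (2 ^ b : Int)) else 0)).sum := by
  by_cases hx : 0 ≤ x
  · obtain ⟨u, rfl⟩ : ∃ u : Nat, x = (u : Nat) := ⟨x.toNat, (Int.toNat_of_nonneg hx).symm⟩
    rw [PySem.Int.bxor_natCast]
    rw [pv_nat_xor_expand M m u h]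
    congr 1
    refine congrArg List.sum (List.map_congr_left ?_)
    intro b _
    rw [pv_int_bit ((u : Nat) : Int) b (by positivity), Int.toNat_natCast]
  · rw [Int.not_le] at hx
    obtain ⟨u, rfl⟩ : ∃ u : Nat, x = -(u : Int) - 1 := ⟨(-x - 1).toNat, by omega⟩
    have hb : PySem.Int.bxor (m : Int) (-(u : Int) - 1) = -((m ^^^ u : Nat) : Int) - 1 := by
      have h1 : (0:Int) ≤ (m : Int) := by positivity
      have h2 : ¬ (0:Int) ≤ -(u : Int) - 1 := by
        have : (0:Int) ≤ (u : Int) := by positivity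
        omega
      simp only [PySem.Int.bxor, if_pos h1, if_neg h2]
      have h3 : (-(-(u : Int) - 1) - 1).toNat = u := by omega
      rw [h3]
      simp
    rw [hb]
    have hterm : ∀ b ∈ List.range M,
        (fun b => if m.testBit b then (if PySem.Int.band ((-(u : Int) - 1) >>> b) 1 == 1 then -(2 ^ b : Int) else (2 ^ b : Int)) else 0) b
          = (fun b => -(if m.testBit b then (if u.testBit b then -(2 ^ b : Int) else (2 ^ b : Int)) else 0)) b := by
      intro b _
      have hxlt : (-(u : Int) - 1) < 0 := by
        have : (0:Int) ≤ (u : Int) := by positivity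
        omega
      simp only
      rw [pv_int_bit_neg _ b hxlt]
      have h3 : (-(-(u : Int) - 1) - 1).toNat = u := by omega
      rw [h3]
      cases hub : u.testBit b <;> cases hmb : m.testBit b <;> simp [hub, hmb]
    rw [List.map_congr_left hterm]
    have hneg : ((List.range M).map (fun b => -(if m.testBit b then (if u.testBit b then -(2 ^ b : Int) else (2 ^ b : Int)) else 0))).sum
        = -(((List.range M).map (fun b => if m.testBit b then (if u.testBit b then -(2 ^ b : Int) else (2 ^ b : Int)) else 0)).sum) := by
      rw [show (fun b => -(if m.testBit b then (if u.testBit b then -(2 ^ b : Int) else (2 ^ b : Int)) else 0))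
            = ((fun y : Int => -y) ∘ (fun b => if m.testBit b then (if u.testBit b then -(2 ^ b : Int) else (2 ^ b : Int)) else 0)) from rfl]
      rw [← List.map_map]
      exact (List.sum_neg _).symm
    rw [hneg]
    have := pv_nat_xor_expand M m u h
    linarith

-- summed over the list: per-element XORs become per-bit tallies
lemma pv_sum_expand (M m : Nat) (h : m < 2 ^ M) (vals : List Int) :
    (vals.map (fun x => PySem.Int.bxor (m : Int) x)).sum
      = vals.sum + ((List.range M).map (fun (b : Nat) => if m.testBit b then
          ((vals.length : Int) - 2 * (vals.map (fun (x : Int) => PySem.Int.band (x >>> b) 1)).sum) <<< b else 0)).sum := by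
  induction vals with
  | nil => simp
  | cons x xs IH =>
    simp only [List.map_cons, List.sum_cons, List.length_cons]
    rw [pv_bxor_expand M m x h, IH]
    have hsplit : ∀ b ∈ List.range M,
        (fun (b : Nat) => if m.testBit b then (((xs.length + 1 : Nat) : Int) - 2 * (PySem.Int.band (x >>> b) 1 + (xs.map (fun (y : Int) => PySem.Int.band (y >>> b) 1)).sum)) <<< b else 0) b
          = (fun (b : Nat) => (if m.testBit b then (if PySem.Int.band (x >>> b) 1 == 1 then -(2 ^ b : Int) else (2 ^ b : Int)) else 0)
              + (if m.testBit b then ((xs.length : Int) - 2 * (xs.map (fun (y : Int) => PySem.Int.band (y >>> b) 1)).sum) <<< b else 0)) b := by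
      intro b _
      simp only
      cases hmb : m.testBit b
      · simp [hmb]
      · simp only [hmb, if_true, Int.shiftLeft_eq]
        have h01 : PySem.Int.band (x >>> b) 1 = 0 ∨ PySem.Int.band (x >>> b) 1 = 1 := by
          rw [PySem.Int.band_one]; exact PySem.Int.mod_two_eq _
        rcases h01 with h0 | h1
        · rw [h0]
          norm_num
          push_cast
          ring
        · rw [h1]
          norm_num
          push_cast
          ring
    rw [List.map_congr_left hsplit, PySem.List.sum_map_add_int]
    push_cast
    ring

-- the while-loop of B adds exactly the delta entries at the set bits of its argument
lemma pv_bitLoop (delta : List Int) (M : Nat) : ∀ (m : Nat), m < 2 ^ M → ∀ (b : Int) (f : Int),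
    pvBitLoop delta (m : Int) b f
      = f + ((List.range M).map (fun (c : Nat) =>
          if m.testBit c then PySem.List.pyGetD delta (b + (c : Int)) 0 else 0)).sum := by
  induction M with
  | zero =>
    intro m hm b f
    have : m = 0 := by omega
    subst this
    rw [pvBitLoop]
    simp
  | succ M IH =>
    intro m hm b f
    by_cases h0 : m = 0
    · subst h0
      rw [pvBitLoop]
      simp [Nat.zero_testBit]
    · rw [pvBitLoop]
      have hg : ¬ ((m : Int) ≤ 0) := by omega
      rw [dif_neg hg]
      have hsh : ((m : Int) >>> (1 : Nat)) = ((m / 2 : Nat) : Int) := by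
        rw [← Int.natCast_shiftRight]
        norm_num [Nat.shiftRight_eq_div_pow]
      have hband : (PySem.Int.band ((m : Int)) 1 == 1) = m.testBit 0 := by
        have hh := pv_int_bit ((m : Int)) 0 (by positivity)
        simpa using hh
      rw [hsh, hband]
      have hm2 : m / 2 < 2 ^ M := by
        have : 2 ^ (M + 1) = 2 * 2 ^ M := by ring
        omega
      rw [IH (m / 2) hm2 (b + 1) _]
      rw [List.range_succ_eq_map, List.map_cons, List.sum_cons, List.map_map]
      have hre : (List.range M).map ((fun (c : Nat) => if m.testBit c then PySem.List.pyGetD delta (b + (c : Int)) 0 else 0) ∘ Nat.succ)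
          = (List.range M).map (fun (c : Nat) => if (m / 2).testBit c then PySem.List.pyGetD delta (b + 1 + (c : Int)) 0 else 0) := by
        apply List.map_congr_left
        intro c _
        simp only [Function.comp_apply, Nat.testBit_succ]
        have hc : b + ((c + 1 : Nat) : Int) = b + 1 + (c : Int) := by push_cast; ring
        rw [hc]
      rw [hre]
      cases hb0 : m.testBit 0 <;> simp [hb0] <;> ring

-- A's range(n)-read of a equals B's slice a[:max(n,0)] when n ≤ len(a)
lemma pv_vals_eq (n : Int) (a : List Int) (hn : n ≤ (a.length : Int)) :
    (PySem.List.pyRange 0 n 1).map (fun j => PySem.List.pyGetD a j 0)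
      = PySem.List.slice a none (some (max n 0)) := by
  rw [PySem.List.slice_to a (le_max_right n 0), PySem.List.pyRange_one, List.map_map]
  apply List.ext_getElem
  · simp only [List.length_map, List.length_range, List.length_take]
    omega
  · intro i h1 h2
    simp only [List.length_map, List.length_range] at h1
    simp only [List.getElem_map, List.getElem_range, Function.comp_apply, List.getElem_take]
    rw [zero_add, PySem.List.pyGetD_natCast]
    exact List.getD_eq_getElem a 0 (by omega)

-- the inner loop of A equals B's bit loop over the precomputed delta table, for 0 ≤ i ≤ k
lemma pv_step (n k i : Int) (a : List Int) (h0 : 0 ≤ i) (hik : i ≤ k) (hn : n ≤ (a.length : Int)) :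
    (PySem.List.pyRange 0 n 1).foldl (fun f j => f + PySem.Int.bxor i (PySem.List.pyGetD a j 0)) 0
      = pvBitLoop ((List.range (PySem.Int.bitLength (max k 0))).map (fun (b : Nat) =>
          (((PySem.List.slice a none (some (max n 0))).length : Int)
            - 2 * ((PySem.List.slice a none (some (max n 0))).map (fun (x : Int) => PySem.Int.band (x >>> b) 1)).sum) <<< b))
          i 0 (PySem.List.slice a none (some (max n 0))).sum := by
  rw [← pv_vals_eq n a hn]
  have hmax := PySem.Int.lt_two_pow_bitLength (max k 0)
  have hle : i.toNat ≤ (max k 0).natAbs := by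
    rcases le_total k 0 with hk | hk
    · omega
    · rw [max_eq_left hk]; omega
  have hlt : i.toNat < 2 ^ PySem.Int.bitLength (max k 0) := by omega
  have him : i = ((i.toNat : Nat) : Int) := by omega
  rw [him]
  rw [PySem.List.foldl_add]
  rw [pv_bitLoop _ _ i.toNat hlt 0 _]
  rw [show (fun j => PySem.Int.bxor ((i.toNat : Nat) : Int) (PySem.List.pyGetD a j 0))
        = ((fun x => PySem.Int.bxor ((i.toNat : Nat) : Int) x) ∘ (fun j => PySem.List.pyGetD a j 0)) from rfl]
  rw [← List.map_map]
  rw [pv_sum_expand _ i.toNat hlt _]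
  have hidx : ∀ c ∈ List.range (PySem.Int.bitLength (max k 0)),
      (fun (c : Nat) => if (i.toNat).testBit c then PySem.List.pyGetD ((List.range (PySem.Int.bitLength (max k 0))).map (fun (b : Nat) =>
          ((((PySem.List.pyRange 0 n 1).map (fun j => PySem.List.pyGetD a j 0)).length : Int)
            - 2 * (((PySem.List.pyRange 0 n 1).map (fun j => PySem.List.pyGetD a j 0)).map (fun (x : Int) => PySem.Int.band (x >>> b) 1)).sum) <<< b)) ((0 : Int) + (c : Int)) 0 else 0) c
        = (fun (c : Nat) => if (i.toNat).testBit c then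
            ((((PySem.List.pyRange 0 n 1).map (fun j => PySem.List.pyGetD a j 0)).length : Int)
              - 2 * (((PySem.List.pyRange 0 n 1).map (fun j => PySem.List.pyGetD a j 0)).map (fun (x : Int) => PySem.Int.band (x >>> c) 1)).sum) <<< c else 0) c := by
    intro c hc
    simp only [zero_add]
    rw [PySem.List.pyGetD_natCast, PySem.List.getD_map_range _ _ _ _ (List.mem_range.mp hc)]
  rw [List.map_congr_left hidx]
  ring

-- ===== VERDICT (by name: the statement is the Claim_ definition above) =====
theorem xor_sum_spec : Claim_equal_xor_sum := by
  unfold Claim_equal_xor_sum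
  intro n k a _ hpre
  unfold Spec_xor_sum xor_sum xor_sum_alt
  by_cases hk : k < 0
  · have hnil : PySem.List.pyRange 0 (k + 1) 1 = [] := by
      rw [PySem.List.pyRange_one]
      have hz : (k + 1 - 0).toNat = 0 := by omega
      rw [hz]
      rfl
    simp only [hnil, List.foldl_nil]
  · have hn : n ≤ (a.length : Int) := by
      rcases hpre with h | h
      · exact h
      · omega
    apply PySem.List.foldl_congr_mem
    intro best i hi
    obtain ⟨hi0, hik⟩ := PySem.List.mem_pyRange_one.mp hi
    simp only [pv_step n k i a hi0 (by omega) hn]
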